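-- pv_equiv track=rewrite | github.com/Backland-Labs/quorum-ai | backend/services/tally_service.py | _parse_vote_statistics
-- ===== SOURCE A (Python) =====
-- from typing import Any, Dict, List, Optional
--
-- def _parse_vote_statistics(vote_stats_data: List[Dict]) -> tuple[str, str, str]:
--     """Parse vote statistics from API response data.
--
--     Args:
--         vote_stats_data: List of vote statistics from API
--
--     Returns:
--         Tuple of (votes_for, votes_against, votes_abstain) as strings
--     """
--     assert isinstance(vote_stats_data, list), "Vote stats data must be a list"
--     assert vote_stats_data is not None, "Vote stats data cannot be None"
--
--     votes_for = "0"
--     votes_against = "0"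
--     votes_abstain = "0"
--
--     for vote_stat in vote_stats_data:
--         vote_type = vote_stat.get("type", "").upper()
--         vote_count = vote_stat.get("votesCount", "0")
--
--         if vote_type == "FOR":
--             votes_for = vote_count
--         elif vote_type == "AGAINST":
--             votes_against = vote_count
--         elif vote_type == "ABSTAIN":
--             votes_abstain = vote_count
--
--     return votes_for, votes_against, votes_abstain
-- ===== SOURCE B (Python) =====
-- from typing import Any, Dict, List, Optional
--
-- def _parse_vote_statistics(vote_stats_data: List[Dict]) -> tuple[str, str, str]:
--     assert isinstance(vote_stats_data, list), "Vote stats data must be a list"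
--     assert vote_stats_data is not None, "Vote stats data cannot be None"
--
--     def last_count(vote_type: str) -> str:
--         # scan back-to-front; the first match from the end is the last write
--         for vote_stat in reversed(vote_stats_data):
--             if vote_stat.get("type", "").upper() == vote_type:
--                 return vote_stat.get("votesCount", "0")
--         return "0"
--
--     return last_count("FOR"), last_count("AGAINST"), last_count("ABSTAIN")
-- ===== Notes on version B (the rewrite author's own statement) =====
-- stated objective: alternative
-- what changed: Replaces A's single forward pass with three branching accumulators by three independent back-to-front searches, each returning at the first (i.e. last-written) matching type with early exit.
import Mathlib
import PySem

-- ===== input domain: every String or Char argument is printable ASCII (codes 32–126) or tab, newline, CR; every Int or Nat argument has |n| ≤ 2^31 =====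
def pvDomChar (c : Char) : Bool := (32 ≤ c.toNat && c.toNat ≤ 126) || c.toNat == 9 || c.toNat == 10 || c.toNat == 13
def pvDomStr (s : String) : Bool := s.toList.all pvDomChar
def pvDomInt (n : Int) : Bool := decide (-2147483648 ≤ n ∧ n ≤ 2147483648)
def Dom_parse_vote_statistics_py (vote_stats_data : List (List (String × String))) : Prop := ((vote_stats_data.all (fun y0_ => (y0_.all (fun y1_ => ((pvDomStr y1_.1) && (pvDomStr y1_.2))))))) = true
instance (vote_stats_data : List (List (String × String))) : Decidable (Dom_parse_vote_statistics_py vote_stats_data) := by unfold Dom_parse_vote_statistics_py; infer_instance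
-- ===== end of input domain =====

-- B replaces A's single forward pass with three branching accumulators by three
-- independent back-to-front searches, each with early exit (objective: alternative).

-- ===== PORT A =====
-- loop body of A: the per-element three-branch dispatch into the accumulator triple
def pvStepA (acc : String × String × String) (vote_stat : List (String × String)) : String × String × String :=
  let d := PySem.Dict.ofList vote_stat
  let vote_type := PySem.Str.upper (d.getD "type" "")
  let vote_count := d.getD "votesCount" "0"
  if vote_type == "FOR" then (vote_count, acc.2.1, acc.2.2)
  else if vote_type == "AGAINST" then (acc.1, vote_count, acc.2.2)
  else if vote_type == "ABSTAIN" then (acc.1, acc.2.1, vote_count)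
  else acc

def parse_vote_statistics_py (vote_stats_data : List (List (String × String))) : String × String × String :=
  vote_stats_data.foldl pvStepA ("0", "0", "0")

-- ===== PORT B =====
-- B's helper last_count applied to the already-reversed list: first match wins
def pvLastCount (vote_type : String) : List (List (String × String)) → String
  | [] => "0"
  | vote_stat :: rest =>
    let d := PySem.Dict.ofList vote_stat
    if PySem.Str.upper (d.getD "type" "") == vote_type then d.getD "votesCount" "0"
    else pvLastCount vote_type rest

def parse_vote_statistics_py_alt (vote_stats_data : List (List (String × String))) : String × String × String :=
  (pvLastCount "FOR" vote_stats_data.reverse,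
   pvLastCount "AGAINST" vote_stats_data.reverse,
   pvLastCount "ABSTAIN" vote_stats_data.reverse)

-- ===== PRECONDITION & SPEC =====
def Spec_parse_vote_statistics_py (vote_stats_data : List (List (String × String))) (out : String × String × String) : Prop := out = parse_vote_statistics_py_alt vote_stats_data
instance (vote_stats_data : List (List (String × String))) (out : String × String × String) : Decidable (Spec_parse_vote_statistics_py vote_stats_data out) := by unfold Spec_parse_vote_statistics_py; infer_instance

-- ===== CLAIM (what is proved, stated in full; the proofs are below) =====
def Claim_equal_parse_vote_statistics_py : Prop := ∀ (vote_stats_data : List (List (String × String))), Dom_parse_vote_statistics_py vote_stats_data → Spec_parse_vote_statistics_py vote_stats_data (parse_vote_statistics_py vote_stats_data)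

-- ===== LEMMAS AND PROOFS =====

-- proof-only generalisation of pvLastCount with an arbitrary fallback value
def pvLastD (vote_type v : String) : List (List (String × String)) → String
  | [] => v
  | vote_stat :: rest =>
    let d := PySem.Dict.ofList vote_stat
    if PySem.Str.upper (d.getD "type" "") == vote_type then d.getD "votesCount" "0"
    else pvLastD vote_type v rest

theorem pvLastD_eq (t : String) (l : List (List (String × String))) :
    pvLastCount t l = pvLastD t "0" l := by
  induction l with
  | nil => rfl
  | cons x xs ih => simp only [pvLastCount, pvLastD, ih]

theorem pvLastD_append_singleton (t v : String) (x : List (String × String))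
    (l : List (List (String × String))) :
    pvLastD t v (l ++ [x]) =
      pvLastD t (let d := PySem.Dict.ofList x;
                 if PySem.Str.upper (d.getD "type" "") == t then d.getD "votesCount" "0" else v) l := by
  induction l with
  | nil => simp [pvLastD]
  | cons y ys ih => simp only [List.cons_append, pvLastD, ih]

-- the fold over the forward list equals the three reversed searches with the
-- accumulator components as fallbacks
theorem pv_fold_eq (l : List (List (String × String))) (acc : String × String × String) :
    l.foldl pvStepA acc =
      (pvLastD "FOR" acc.1 l.reverse,
       pvLastD "AGAINST" acc.2.1 l.reverse,
       pvLastD "ABSTAIN" acc.2.2 l.reverse) := by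
  induction l generalizing acc with
  | nil => simp [pvLastD]
  | cons x xs ih =>
    simp only [List.foldl_cons, List.reverse_cons, pvLastD_append_singleton, ih]
    unfold pvStepA
    split_ifs with h1 h2 h3 <;> simp_all

-- ===== VERDICT (by name: the statement is the Claim_ definition above) =====
theorem parse_vote_statistics_py_spec : Claim_equal_parse_vote_statistics_py := by
  intro l _
  show _ = _
  rw [parse_vote_statistics_py, pv_fold_eq, parse_vote_statistics_py_alt]
  simp [pvLastD_eq]
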